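-- pv_equiv track=rewrite | github.com/Limuranius/kyoto-shogi-engine | bitboard/utils.py | get_attack_mask_str
-- ===== SOURCE A (Python) =====
-- def get_attack_mask_str(
--         figure_mask: str,  # str of 1 or 0, where 1 - cell is occupied
--         attacker_i: int,
--         go_left: bool,
--         go_right: bool,
-- ) -> str:
--     assert figure_mask[attacker_i] == "1"
--
--     attack_mask_str = list("00000")
--     if go_left:
--         for l in range(attacker_i - 1, -1, -1):  # searching left non-obstructed attacks
--             attack_mask_str[l] = "1"
--             if figure_mask[l] == "1":
--                 break
--     if go_right:
--         for r in range(attacker_i + 1, len(figure_mask)):  # searching right non-obstructed attacks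
--             attack_mask_str[r] = "1"
--             if figure_mask[r] == "1":
--                 break
--     attack_mask_str = "".join(attack_mask_str)
--     return attack_mask_str
-- ===== SOURCE B (Python) =====
-- def get_attack_mask_str(
--         figure_mask: str,  # str of 1 or 0, where 1 - cell is occupied
--         attacker_i: int,
--         go_left: bool,
--         go_right: bool,
-- ) -> str:
--     assert figure_mask[attacker_i] == "1"
--     lo = attacker_i
--     hi = attacker_i
--     if go_left:
--         j = figure_mask[:attacker_i].rfind("1")
--         lo = j if j != -1 else 0
--     if go_right:
--         j = figure_mask[attacker_i + 1:].find("1")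
--         hi = attacker_i + 1 + j if j != -1 else len(figure_mask) - 1
--     return "".join("1" if lo <= k <= hi and k != attacker_i else "0" for k in range(5))
-- ===== Notes on version B (the rewrite author's own statement) =====
-- stated objective: simpler
-- what changed: B computes the nearest obstruction in each direction once with string search (rfind on the prefix slice, find on the suffix slice) and then fills the 5-cell mask with a single range comprehension, instead of A's cell-by-cell scans with break that mutate a buffer while iterating.
-- outside the precondition, e.g. on get_attack_mask_str('10', -2, False, True): A returns '10001', B returns '11000'; on get_attack_mask_str('101', -1, True, True): A returns '10000', B returns '10000'
import Mathlib
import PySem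

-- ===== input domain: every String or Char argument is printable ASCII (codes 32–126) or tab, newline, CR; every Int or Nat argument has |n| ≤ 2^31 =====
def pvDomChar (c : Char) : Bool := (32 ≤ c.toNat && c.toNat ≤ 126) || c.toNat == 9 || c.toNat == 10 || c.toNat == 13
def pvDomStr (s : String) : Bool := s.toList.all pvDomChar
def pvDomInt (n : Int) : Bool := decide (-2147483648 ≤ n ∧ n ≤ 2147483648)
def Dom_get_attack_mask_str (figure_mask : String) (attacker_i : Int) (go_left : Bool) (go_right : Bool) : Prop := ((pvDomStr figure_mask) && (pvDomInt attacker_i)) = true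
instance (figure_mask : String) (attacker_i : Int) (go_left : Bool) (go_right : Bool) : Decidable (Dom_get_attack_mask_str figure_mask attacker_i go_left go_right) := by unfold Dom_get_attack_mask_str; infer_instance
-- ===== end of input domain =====

-- B computes the nearest obstruction in each direction once with string search (rfind/find on
-- slices) and fills the 5-cell mask by a range comprehension, instead of A's cell-by-cell scans
-- with break that mutate a buffer while iterating; objective: simpler decomposition, not speed.

-- ===== PORT A =====
-- one direction of A's scan: for each index l in idxs, buf[l] = '1', break when figure_mask[l] == '1'
-- (the buffer write is ported with PySem.List.pySetD, the total form of Python list assignment;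
-- inside Pre_ every written index is in range, so this is exact there)
def pvAScan (fm : List Char) (idxs : List Int) (buf : List Char) : List Char :=
  match idxs with
  | [] => buf
  | l :: rest =>
      let buf' := PySem.List.pySetD buf l '1'
      if PySem.List.pyGet? fm l = some '1' then buf' else pvAScan fm rest buf'

def get_attack_mask_str (figure_mask : String) (attacker_i : Int) (go_left : Bool) (go_right : Bool) : String :=
  let fm := figure_mask.toList
  let buf0 := ['0', '0', '0', '0', '0']
  let buf1 := if go_left then pvAScan fm (PySem.List.pyRange (attacker_i - 1) (-1) (-1)) buf0 else buf0
  let buf2 := if go_right then pvAScan fm (PySem.List.pyRange (attacker_i + 1) (fm.length : Int) 1) buf1 else buf1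
  String.ofList buf2

-- ===== PORT B =====
def get_attack_mask_str_alt (figure_mask : String) (attacker_i : Int) (go_left : Bool) (go_right : Bool) : String :=
  let fm := figure_mask.toList
  let lo : Int :=
    if go_left then
      let j := PySem.Chars.rfind (PySem.List.slice fm none (some attacker_i)) ['1']
      if j ≠ -1 then j else 0
    else attacker_i
  let hi : Int :=
    if go_right then
      let j := PySem.Chars.find (PySem.List.slice fm (some (attacker_i + 1)) none) ['1']
      if j ≠ -1 then attacker_i + 1 + j else (fm.length : Int) - 1
    else attacker_i
  String.ofList ((PySem.List.pyRange 0 5 1).map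
    (fun k => if lo ≤ k ∧ k ≤ hi ∧ k ≠ attacker_i then '1' else '0'))

-- ===== PRECONDITION & SPEC =====
-- Pre_ is exactly the closed form of "A returns normally and attacker_i is non-negative":
-- the attacker cell is in range and '1', a left scan never writes past the 5-cell buffer
-- (attacker_i ≤ 5), and a right scan is empty, inside a ≤ 5-cell mask, or stopped by an
-- obstruction no later than cell 4.  Negative in-range attacker_i (where A returns only via
-- Python's negative-index wraparound, outside the task's board-cell domain) is excluded.
def Pre_get_attack_mask_str (figure_mask : String) (attacker_i : Int) (go_left : Bool) (go_right : Bool) : Prop :=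
  0 ≤ attacker_i ∧ attacker_i < figure_mask.toList.length ∧
  PySem.List.pyGet? figure_mask.toList attacker_i = some '1' ∧
  (go_left = true → attacker_i ≤ 5) ∧
  (go_right = true →
    ((figure_mask.toList.length : Int) ≤ attacker_i + 1 ∨ figure_mask.toList.length ≤ 5 ∨
      ∃ j ∈ PySem.List.pyRange (attacker_i + 1) 5 1,
        PySem.List.pyGet? figure_mask.toList j = some '1'))
instance (figure_mask : String) (attacker_i : Int) (go_left : Bool) (go_right : Bool) : Decidable (Pre_get_attack_mask_str figure_mask attacker_i go_left go_right) := by unfold Pre_get_attack_mask_str; infer_instance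

def pvWitness_get_attack_mask_str : String × Int × Bool × Bool := ("01010", 1, true, true)

def Spec_get_attack_mask_str (figure_mask : String) (attacker_i : Int) (go_left : Bool) (go_right : Bool) (out : String) : Prop := out = get_attack_mask_str_alt figure_mask attacker_i go_left go_right
instance (figure_mask : String) (attacker_i : Int) (go_left : Bool) (go_right : Bool) (out : String) : Decidable (Spec_get_attack_mask_str figure_mask attacker_i go_left go_right out) := by unfold Spec_get_attack_mask_str; infer_instance

-- ===== CLAIM (what is proved, stated in full; the proofs are below) =====
def Claim_equal_get_attack_mask_str : Prop := ∀ (figure_mask : String) (attacker_i : Int) (go_left : Bool) (go_right : Bool), Dom_get_attack_mask_str figure_mask attacker_i go_left go_right → Pre_get_attack_mask_str figure_mask attacker_i go_left go_right → Spec_get_attack_mask_str figure_mask attacker_i go_left go_right (get_attack_mask_str figure_mask attacker_i go_left go_right)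

-- ===== LEMMAS AND PROOFS =====

-- ['1'] is a prefix of l iff l starts with '1'
theorem pvPrefixOne (l : List Char) : ['1'].isPrefixOf l = true ↔ l.head? = some '1' := by
  cases l with
  | nil => simp [List.isPrefixOf]
  | cons x t =>
      simp only [List.isPrefixOf, List.head?_cons, Option.some.injEq, Bool.and_true]
      constructor
      · intro h; exact (beq_iff_eq.mp h).symm
      · intro h; exact beq_iff_eq.mpr h.symm

theorem pvFindShift (s : List Char) : ∀ (k : Nat),
    PySem.Chars.find.go ['1'] s (k + 1) =
      if PySem.Chars.find.go ['1'] s k = -1 then -1 else PySem.Chars.find.go ['1'] s k + 1 := by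
  induction s with
  | nil => intro k; simp [PySem.Chars.find.go]
  | cons x t ih =>
      intro k
      simp only [PySem.Chars.find.go]
      by_cases hx : ['1'].isPrefixOf (x :: t) = true
      · have hk : ((k : Int)) ≠ -1 := by omega
        simp [hx, hk]
      · simp only [hx]
        exact ih (k + 1)

theorem pvFindNilOne : PySem.Chars.find [] ['1'] = -1 := by
  simp [PySem.Chars.find, PySem.Chars.find.go]

theorem pvFindCons (x : Char) (s : List Char) :
    PySem.Chars.find (x :: s) ['1'] =
      if x = '1' then 0
      else if PySem.Chars.find s ['1'] = -1 then -1 else PySem.Chars.find s ['1'] + 1 := by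
  have h := pvFindShift s 0
  simp only [PySem.Chars.find] at h ⊢
  rw [PySem.Chars.find.go]
  by_cases hx : x = '1'
  · rw [if_pos ((pvPrefixOne _).mpr (by simp [hx])), if_pos hx]; norm_num
  · have hc : ¬ (['1'].isPrefixOf (x :: s) = true) := by
      rw [pvPrefixOne]; simp [hx]
    rw [if_neg hc, if_neg hx]
    exact h

theorem pvFindBound (s : List Char) :
    PySem.Chars.find s ['1'] = -1 ∨
      (0 ≤ PySem.Chars.find s ['1'] ∧ PySem.Chars.find s ['1'] < s.length) := by
  induction s with
  | nil => left; exact pvFindNilOne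
  | cons x t ih =>
      rw [pvFindCons]
      have hlen : (x :: t).length = t.length + 1 := rfl
      by_cases hx : x = '1'
      · subst hx; right; rw [if_pos rfl]; omega
      · simp only [hx, if_false]
        rcases ih with h | ⟨h1, h2⟩
        · left; simp [h]
        · right
          have hne : PySem.Chars.find t ['1'] ≠ -1 := by omega
          simp only [hne, if_false]
          omega

theorem pvFindLe (s : List Char) : ∀ (p : Nat), s[p]? = some '1' →
    0 ≤ PySem.Chars.find s ['1'] ∧ PySem.Chars.find s ['1'] ≤ p := by
  induction s with
  | nil => intro p hp; simp at hp
  | cons x t ih =>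
      intro p hp
      rw [pvFindCons]
      by_cases hx : x = '1'
      · simp [hx]
      · cases p with
        | zero => simp at hp; exact absurd hp hx
        | succ p =>
            simp only [List.getElem?_cons_succ] at hp
            obtain ⟨h1, h2⟩ := ih p hp
            have : PySem.Chars.find t ['1'] ≠ -1 := by omega
            simp only [hx, if_false, this]
            push_cast
            omega

theorem pvRfindGoAppend (s : List Char) (x : Char) : ∀ (j : Nat), j < s.length →
    PySem.Chars.rfind.go (s ++ [x]) ['1'] j = PySem.Chars.rfind.go s ['1'] j := by
  intro j
  induction j with
  | zero =>
      intro hj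
      rw [PySem.Chars.rfind.go, PySem.Chars.rfind.go]
      rcases s with _ | ⟨y, t⟩
      · simp at hj
      · simp
  | succ j ih =>
      intro hj
      rw [PySem.Chars.rfind.go, PySem.Chars.rfind.go]
      have hdrop : (s ++ [x]).drop (j + 1) = s.drop (j + 1) ++ [x] :=
        List.drop_append_of_le_length (by omega)
      have hne : s.drop (j + 1) ≠ [] := by
        intro h
        have := List.drop_eq_nil_iff.mp h
        omega
      have hhead : ((s ++ [x]).drop (j + 1)).head? = (s.drop (j + 1)).head? := by
        rw [hdrop]
        rcases h : s.drop (j + 1) with _ | ⟨z, u⟩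
        · exact absurd h hne
        · simp
      simp only [pvPrefixOne, hhead]
      split
      · rfl
      · exact ih (by omega)

theorem pvRfindSnoc (s : List Char) (x : Char) :
    PySem.Chars.rfind (s ++ [x]) ['1'] =
      if x = '1' then (s.length : Int) else PySem.Chars.rfind s ['1'] := by
  have hlen : (s ++ [x]).length = s.length + 1 := by simp
  simp only [PySem.Chars.rfind, hlen]
  rw [show s.length + 1 = Nat.succ s.length from rfl, PySem.Chars.rfind.go.eq_2]
  have hd1 : (s ++ [x]).drop (s.length + 1) = [] := by simp
  rw [hd1]
  rw [if_neg (by simp [List.isPrefixOf])]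
  rcases s with _ | ⟨y, t⟩
  · simp only [List.nil_append, List.length_nil]
    rw [PySem.Chars.rfind.go.eq_1]
    by_cases hx : x = '1'
    · rw [if_pos ((pvPrefixOne _).mpr (by simp [hx])), if_pos hx]; norm_num
    · rw [if_neg (by rw [pvPrefixOne]; simp [hx]), if_neg hx]
      rw [PySem.Chars.rfind.go.eq_1]
      rw [if_neg (by simp [List.isPrefixOf])]
  · have hlen2 : (y :: t).length = t.length + 1 := rfl
    rw [show ((y :: t).length) = t.length + 1 from rfl]
    rw [PySem.Chars.rfind.go]
    have hd2 : ((y :: t) ++ [x]).drop (t.length + 1) = [x] := by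
      simp
    rw [hd2]
    by_cases hx : x = '1'
    · rw [if_pos ((pvPrefixOne _).mpr (by simp [hx])), if_pos hx]
    · rw [if_neg (by rw [pvPrefixOne]; simp [hx]), if_neg hx]
      rw [pvRfindGoAppend (y :: t) x t.length (by simp)]
      conv_rhs => rw [show t.length + 1 = Nat.succ t.length from rfl,
        PySem.Chars.rfind.go.eq_2]
      have hd3 : (y :: t).drop (t.length + 1) = [] := by
        apply List.drop_of_length_le
        simp
      rw [hd3]
      rw [if_neg (by simp [List.isPrefixOf])]

theorem pvRfindBound (s : List Char) :
    PySem.Chars.rfind s ['1'] = -1 ∨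
      (0 ≤ PySem.Chars.rfind s ['1'] ∧ PySem.Chars.rfind s ['1'] < s.length) := by
  induction s using List.reverseRecOn with
  | nil => left; rfl
  | append_singleton t x ih =>
      rw [pvRfindSnoc]
      have hlen : (t ++ [x]).length = t.length + 1 := by simp
      by_cases hx : x = '1'
      · subst hx; right; rw [if_pos rfl]; omega
      · simp only [hx, if_false]
        rcases ih with h | ⟨h1, h2⟩
        · left; exact h
        · right; omega

theorem pvAScanLen (fm : List Char) : ∀ (idxs : List Int) (buf : List Char),
    (pvAScan fm idxs buf).length = buf.length := by
  intro idxs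
  induction idxs with
  | nil => intro buf; rfl
  | cons l rest ih =>
      intro buf
      simp only [pvAScan]
      split
      · simp [PySem.List.length_pySetD]
      · rw [ih]; simp [PySem.List.length_pySetD]

theorem pvSetGet (buf : List Char) (hb : buf.length = 5) (m k : Nat) (hm : m < 5) (v : Char) :
    (PySem.List.pySetD buf (m : Int) v)[k]? = if m = k then some v else buf[k]? := by
  rw [PySem.List.pySetD_natCast, List.getElem?_set]
  split_ifs with h1 h2
  · rfl
  · omega
  · rfl

theorem pvLeftScan (L : List Char) : ∀ (m : Nat), m ≤ 5 → m ≤ L.length →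
    ∀ (buf : List Char), buf.length = 5 → ∀ (k : Nat), k < 5 →
    (pvAScan L (PySem.List.pyRange ((m : Int) - 1) (-1) (-1)) buf)[k]? =
      if (if PySem.Chars.rfind (L.take m) ['1'] = -1 then 0
            else PySem.Chars.rfind (L.take m) ['1']) ≤ (k : Int) ∧ (k : Int) < (m : Int)
      then some '1' else buf[k]? := by
  intro m
  induction m with
  | zero =>
      intro _ _ buf hb k hk
      rw [PySem.List.pyRange_neg_one_eq_nil (by norm_num)]
      show buf[k]? = _
      rw [if_neg (by rintro ⟨-, h2⟩; omega)]
  | succ m ih =>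
      intro hm5 hmn buf hb k hk
      have hmn' : m < L.length := by omega
      have hcast : ((m + 1 : Nat) : Int) - 1 = (m : Int) := by push_cast; ring
      rw [hcast, PySem.List.pyRange_neg_one_cons (by omega)]
      simp only [pvAScan]
      have htake : L.take (m + 1) = L.take m ++ [L[m]] := by
        rw [List.take_succ]
        simp [List.getElem?_eq_getElem hmn']
      rw [htake, pvRfindSnoc]
      have hlt : (L.take m).length = m := by
        simp [List.length_take]; omega
      rw [hlt]
      have hltI : ((List.take m L).length : Int) = (m : Int) := by rw [hlt]
      by_cases hx : L[m] = '1'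
      · have hget : PySem.List.pyGet? L ((m : Nat) : Int) = some '1' := by
          simp [List.getElem?_eq_getElem hmn', hx]
        rw [if_pos hget, if_pos hx, pvSetGet buf hb m k (by omega)]
        split_ifs <;> first | rfl | omega | contradiction
      · have hget : ¬ (PySem.List.pyGet? L ((m : Nat) : Int) = some '1') := by
          simp [List.getElem?_eq_getElem hmn', hx]
        rw [if_neg hget, if_neg hx]
        rw [ih (by omega) (by omega) _ (by rw [PySem.List.length_pySetD]; exact hb) k hk]
        rw [pvSetGet buf hb m k (by omega)]
        rcases pvRfindBound (L.take m) with hr | ⟨hr1, hr2⟩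
        · split_ifs <;> first | rfl | omega
        · rw [hlt] at hr2
          split_ifs <;> first | rfl | omega

theorem pvRightScan (L : List Char) : ∀ (d m : Nat), L.length = m + d →
    ((m : Int) < L.length →
      (if PySem.Chars.find (L.drop m) ['1'] = -1 then (L.length : Int) - 1
        else (m : Int) + PySem.Chars.find (L.drop m) ['1']) ≤ 4) →
    ∀ (buf : List Char), buf.length = 5 → ∀ (k : Nat), k < 5 →
    (pvAScan L (PySem.List.pyRange (m : Int) (L.length : Int) 1) buf)[k]? =
      if (m : Int) ≤ (k : Int) ∧ (k : Int) ≤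
          (if PySem.Chars.find (L.drop m) ['1'] = -1 then (L.length : Int) - 1
            else (m : Int) + PySem.Chars.find (L.drop m) ['1'])
      then some '1' else buf[k]? := by
  intro d
  induction d with
  | zero =>
      intro m hd _ buf hb k hk
      rw [PySem.List.pyRange_one_eq_nil (by omega)]
      show buf[k]? = _
      have hdrop : L.drop m = [] := List.drop_of_length_le (by omega)
      rw [hdrop, pvFindNilOne, if_pos rfl]
      rw [if_neg (by rintro ⟨ha, hbb⟩; omega)]
  | succ d ih =>
      intro m hd hstop buf hb k hk
      have hm : m < L.length := by omega
      rw [PySem.List.pyRange_one_cons (by exact_mod_cast hm)]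
      simp only [pvAScan]
      have hdrop : L.drop m = L[m] :: L.drop (m + 1) := List.drop_eq_getElem_cons hm
      rw [hdrop, pvFindCons] at hstop ⊢
      have hFb := pvFindBound (L.drop (m + 1))
      have hdl : (L.drop (m + 1)).length = L.length - (m + 1) := by
        simp [List.length_drop]
      rw [hdl] at hFb
      have h2 := hstop (by exact_mod_cast hm)
      by_cases hx : L[m] = '1'
      · rw [if_pos hx] at h2 ⊢
        have hm4 : (m : Int) ≤ 4 := by split_ifs at h2 <;> omega
        have hget : PySem.List.pyGet? L ((m : Nat) : Int) = some '1' := by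
          simp [List.getElem?_eq_getElem hm, hx]
        rw [if_pos hget, pvSetGet buf hb m k (by omega)]
        clear hstop hFb
        split_ifs <;> first | rfl | omega | contradiction
      · rw [if_neg hx] at h2 ⊢
        have hget : ¬ (PySem.List.pyGet? L ((m : Nat) : Int) = some '1') := by
          simp [List.getElem?_eq_getElem hm, hx]
        rw [if_neg hget]
        rw [show (m : Int) + 1 = ((m + 1 : Nat) : Int) by push_cast; ring]
        rw [ih (m + 1) (by omega)
          (by
            intro h'
            rcases hFb with hF1 | ⟨hf1, hf2⟩
            · rw [hF1, if_pos rfl] at h2 ⊢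
              omega
            · have hne : PySem.Chars.find (L.drop (m + 1)) ['1'] ≠ -1 := by omega
              rw [if_neg (by omega), if_neg hne] at h2
              rw [if_neg hne]
              push_cast
              omega)
          _ (by rw [PySem.List.length_pySetD]; exact hb) k hk]
        rw [pvSetGet buf hb m k (by rcases hFb with hF1 | ⟨hf1, hf2⟩ <;> split_ifs at h2 <;> omega)]
        clear hstop
        rcases hFb with hF1 | ⟨hf1, hf2⟩ <;> split_ifs <;> first | rfl | omega

theorem pvBuf0 (k : Nat) (hk : k < 5) : (['0', '0', '0', '0', '0'] : List Char)[k]? = some '0' := by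
  interval_cases k <;> rfl

theorem pvTakeLen (L : List Char) (I : Nat) (h : I ≤ L.length) : (L.take I).length = I := by
  simp [List.length_take]; omega

-- right-direction safety: under Pre_'s right disjunction the scan stops at cell 4 or earlier
theorem pvStopLe (L : List Char) (I : Nat) (_hin : I < L.length)
    (hgr : (L.length : Int) ≤ (I : Int) + 1 ∨ L.length ≤ 5 ∨
      ∃ j ∈ PySem.List.pyRange ((I : Int) + 1) 5 1, PySem.List.pyGet? L j = some '1') :
    (((I + 1 : Nat) : Int) < L.length →
      (if PySem.Chars.find (L.drop (I + 1)) ['1'] = -1 then (L.length : Int) - 1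
        else ((I + 1 : Nat) : Int) + PySem.Chars.find (L.drop (I + 1)) ['1']) ≤ 4) := by
  intro h'
  have hdl : (L.drop (I + 1)).length = L.length - (I + 1) := by simp
  rcases hgr with hcase | hcase | ⟨j, hjmem, hj1⟩
  · omega
  · rcases pvFindBound (L.drop (I + 1)) with hF | ⟨hf1, hf2⟩
    · rw [hF, if_pos rfl]; omega
    · rw [hdl] at hf2
      rw [if_neg (by omega)]
      omega
  · obtain ⟨hj1m, hj5⟩ := PySem.List.mem_pyRange_one.mp hjmem
    have hj0 : (0 : Int) ≤ j := by omega
    rw [PySem.List.pyGet?_of_nonneg L hj0] at hj1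
    have hjI : I + 1 ≤ j.toNat := by omega
    have hdropj : (L.drop (I + 1))[j.toNat - (I + 1)]? = some '1' := by
      rw [List.getElem?_drop, show (I + 1) + (j.toNat - (I + 1)) = j.toNat by omega]
      exact hj1
    obtain ⟨hf0, hfle⟩ := pvFindLe (L.drop (I + 1)) (j.toNat - (I + 1)) hdropj
    rw [if_neg (by omega)]
    omega

theorem pvMain (L : List Char) (I : Nat) (gl gr : Bool)
    (hin : I < L.length)
    (hgl : gl = true → (I : Int) ≤ 5)
    (hgr : gr = true → ((L.length : Int) ≤ (I : Int) + 1 ∨ L.length ≤ 5 ∨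
      ∃ j ∈ PySem.List.pyRange ((I : Int) + 1) 5 1, PySem.List.pyGet? L j = some '1')) :
    (if gr then
        pvAScan L (PySem.List.pyRange ((I : Int) + 1) (L.length : Int) 1)
          (if gl then pvAScan L (PySem.List.pyRange ((I : Int) - 1) (-1) (-1)) ['0', '0', '0', '0', '0']
           else ['0', '0', '0', '0', '0'])
      else
        (if gl then pvAScan L (PySem.List.pyRange ((I : Int) - 1) (-1) (-1)) ['0', '0', '0', '0', '0']
         else ['0', '0', '0', '0', '0'])) =
    (PySem.List.pyRange 0 5 1).map (fun k =>
      if (if gl then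
            (if PySem.Chars.rfind (PySem.List.slice L none (some (I : Int))) ['1'] ≠ -1
             then PySem.Chars.rfind (PySem.List.slice L none (some (I : Int))) ['1'] else 0)
          else (I : Int)) ≤ k ∧
         k ≤ (if gr then
            (if PySem.Chars.find (PySem.List.slice L (some ((I : Int) + 1)) none) ['1'] ≠ -1
             then (I : Int) + 1 + PySem.Chars.find (PySem.List.slice L (some ((I : Int) + 1)) none) ['1']
             else (L.length : Int) - 1)
          else (I : Int)) ∧ k ≠ (I : Int) then '1' else '0') := by
  have hI1 : (I : Int) + 1 = ((I + 1 : Nat) : Int) := by push_cast; ring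
  have htl : (L.take I).length = I := pvTakeLen L I (by omega)
  have hdl : (L.drop (I + 1)).length = L.length - (I + 1) := by simp
  rw [show (5 : Int) = ((5 : Nat) : Int) from rfl]
  rw [PySem.List.slice_to_natCast, hI1, PySem.List.slice_from_natCast]
  have hFb := pvFindBound (L.drop (I + 1)); rw [hdl] at hFb
  have hRb := pvRfindBound (L.take I); rw [htl] at hRb
  apply List.ext_getElem?
  intro k
  by_cases hk : k < 5
  · rw [PySem.List.getElem?_map_pyRange_zero _ 5 k hk]
    cases gl <;> cases gr <;>
      simp only [Bool.false_eq_true, if_true, if_false]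
    · -- gl = false, gr = false
      rw [pvBuf0 k hk, if_neg (by rintro ⟨a, b, c⟩; omega)]
    · -- gl = false, gr = true
      rw [pvRightScan L (L.length - (I + 1)) (I + 1) (by omega)
        (pvStopLe L I hin (hgr rfl)) _ rfl k hk]
      rw [pvBuf0 k hk]
      rcases hFb with hF | ⟨hf1, hf2⟩ <;> split_ifs <;> first | rfl | omega
    · -- gl = true, gr = false
      rw [pvLeftScan L I (by exact_mod_cast hgl rfl) (by omega) _ rfl k hk]
      rw [pvBuf0 k hk]
      rcases hRb with hr | ⟨hr1, hr2⟩ <;> split_ifs <;> first | rfl | omega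
    · -- gl = true, gr = true
      rw [pvRightScan L (L.length - (I + 1)) (I + 1) (by omega)
        (pvStopLe L I hin (hgr rfl)) _ (by rw [pvAScanLen]; rfl) k hk]
      rw [pvLeftScan L I (by exact_mod_cast hgl rfl) (by omega) _ rfl k hk]
      rw [pvBuf0 k hk]
      rcases hFb with hF | ⟨hf1, hf2⟩ <;> rcases hRb with hr | ⟨hr1, hr2⟩ <;>
        split_ifs <;> first | rfl | omega
  · rw [List.getElem?_eq_none (by cases gl <;> cases gr <;> simp [pvAScanLen] <;> omega),
        List.getElem?_eq_none (by simp [PySem.List.length_pyRange_one]; omega)]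

-- ===== VERDICT (by name: the statement is the Claim_ definition above) =====
theorem get_attack_mask_str_spec : Claim_equal_get_attack_mask_str := by
  intro fm i gl gr _hd hpre
  obtain ⟨h0, hin, _hat, hgl, hgr⟩ := hpre
  obtain ⟨I, rfl⟩ : ∃ I : Nat, i = (I : Int) := ⟨i.toNat, (Int.toNat_of_nonneg h0).symm⟩
  have hinN : I < fm.toList.length := by exact_mod_cast hin
  show get_attack_mask_str fm (I : Int) gl gr = get_attack_mask_str_alt fm (I : Int) gl gr
  exact congrArg String.ofList (pvMain fm.toList I gl gr hinN hgl hgr)
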